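-- pv_equiv track=rewrite | github.com/tangboyue157-cell/proof-auditor | core/back_translator.py | _strip_lean_block_comments_preserve_lines
-- ===== SOURCE A (Python) =====
-- def _strip_lean_block_comments_preserve_lines(text: str) -> str:
--     """Remove Lean block comments while preserving line structure.
--
--     Lean block comments can be nested. We therefore use a small scanner
--     instead of a single regex. Newlines are preserved so that surrounding
--     line numbers remain approximately stable for human-readable diagnostics.
--     """
--     out: list[str] = []
--     i = 0
--     depth = 0
--     while i < len(text):
--         if text.startswith("/-", i):
--             depth += 1
--             i += 2
--             continue
--         if depth > 0 and text.startswith("-/", i):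
--             depth -= 1
--             i += 2
--             continue
--
--         ch = text[i]
--         if depth > 0:
--             if ch == "\n":
--                 out.append("\n")
--             else:
--                 out.append(" ")
--         else:
--             out.append(ch)
--         i += 1
--     return "".join(out)
-- ===== SOURCE B (Python) =====
-- def _strip_lean_block_comments_preserve_lines(text: str) -> str:
--     """Region-based scanner: jump between comment markers with str.find
--     instead of stepping one character at a time."""
--     out = []
--     i = 0
--     depth = 0
--     n = len(text)
--     while i < n:
--         if depth == 0:
--             j = text.find("/-", i)
--             if j == -1:
--                 out.append(text[i:])
--                 break
--             out.append(text[i:j])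
--             depth = 1
--             i = j + 2
--         else:
--             jo = text.find("/-", i)
--             jc = text.find("-/", i)
--             if jo == -1 and jc == -1:
--                 out.append("".join("\n" if ch == "\n" else " " for ch in text[i:]))
--                 break
--             if jc == -1 or (jo != -1 and jo <= jc):
--                 j, depth = jo, depth + 1
--             else:
--                 j, depth = jc, depth - 1
--             out.append("".join("\n" if ch == "\n" else " " for ch in text[i:j]))
--             i = j + 2
--     return "".join(out)
-- ===== Notes on version B (the rewrite author's own statement) =====
-- stated objective: faster
-- what changed: Replaced A's per-character state-machine loop by a region scanner that uses str.find to jump to the next comment open/close marker and copies or blanks whole segments at once.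
import Mathlib
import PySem

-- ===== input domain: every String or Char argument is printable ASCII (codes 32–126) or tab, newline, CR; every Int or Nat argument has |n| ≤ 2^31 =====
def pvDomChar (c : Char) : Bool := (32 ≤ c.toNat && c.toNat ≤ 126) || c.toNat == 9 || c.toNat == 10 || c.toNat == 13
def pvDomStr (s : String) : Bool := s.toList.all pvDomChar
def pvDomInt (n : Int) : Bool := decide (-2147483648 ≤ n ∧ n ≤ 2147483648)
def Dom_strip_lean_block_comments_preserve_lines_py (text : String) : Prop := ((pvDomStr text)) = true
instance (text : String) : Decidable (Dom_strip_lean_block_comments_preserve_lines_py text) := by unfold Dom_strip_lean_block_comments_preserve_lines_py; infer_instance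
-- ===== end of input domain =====

-- B replaces A's per-character scanner by a region scanner that jumps from marker to marker
-- with a substring-find, copying or blanking whole segments at once (objective: faster, constant-factor).

-- ===== PORT A =====
-- A: char-by-char loop, state (i, depth, out); markers emit nothing, depth-0 "-/" copied verbatim.
def stripGoA : List Char → Nat → List Char
  | [], _ => []
  | c :: rest, depth =>
    if c = '/' ∧ rest.head? = some '-' then stripGoA rest.tail (depth + 1)
    else if depth > 0 ∧ c = '-' ∧ rest.head? = some '/' then stripGoA rest.tail (depth - 1)
    else (if depth > 0 then (if c = '\n' then c else ' ') else c) :: stripGoA rest depth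
  termination_by l _ => l.length
  decreasing_by all_goals (simp [List.length_tail]; try omega)

def strip_lean_block_comments_preserve_lines_py (text : String) : String :=
  String.ofList (stripGoA text.toList 0)

-- ===== PORT B =====
-- find2 a b l = index of first occurrence of the two-char pattern [a, b]  (Python str.find)
def find2 (a b : Char) : List Char → Option Nat
  | [] => none
  | c :: rest => if c = a ∧ rest.head? = some b then some 0 else (find2 a b rest).map (· + 1)

theorem find2_le {a b : Char} : ∀ {l : List Char} {j : Nat}, find2 a b l = some j → j + 2 ≤ l.length := by
  intro l
  induction l with
  | nil => intro j h; simp [find2] at h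
  | cons c rest ih =>
    intro j h
    simp only [find2] at h
    split at h
    · rename_i hm
      cases h
      obtain ⟨-, hh⟩ := hm
      cases rest with
      | nil => simp at hh
      | cons d t => simp
    · cases hf : find2 a b rest with
      | none => rw [hf] at h; simp at h
      | some k =>
        rw [hf] at h; simp at h
        have := ih hf
        subst h
        simp
        omega

-- blanking of a comment segment: keep newlines, space everything else
def blankB (l : List Char) : List Char := l.map (fun c => if c = '\n' then c else ' ')

def stripGoB (l : List Char) (depth : Nat) : List Char :=
  if depth = 0 then
    match h : find2 '/' '-' l with
    | none => l
    | some j => l.take j ++ stripGoB (l.drop (j + 2)) 1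
  else
    match h1 : find2 '/' '-' l, h2 : find2 '-' '/' l with
    | none, none => blankB l
    | some j, none => blankB (l.take j) ++ stripGoB (l.drop (j + 2)) (depth + 1)
    | none, some k => blankB (l.take k) ++ stripGoB (l.drop (k + 2)) (depth - 1)
    | some j, some k =>
      if j ≤ k then blankB (l.take j) ++ stripGoB (l.drop (j + 2)) (depth + 1)
      else blankB (l.take k) ++ stripGoB (l.drop (k + 2)) (depth - 1)
  termination_by l.length
  decreasing_by
    all_goals first
      | (have := find2_le h; simp; omega)
      | (have := find2_le h1; simp; omega)
      | (have := find2_le h2; simp; omega)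

def strip_lean_block_comments_preserve_lines_py_alt (text : String) : String :=
  String.ofList (stripGoB text.toList 0)

-- ===== PRECONDITION & SPEC =====
def Spec_strip_lean_block_comments_preserve_lines_py (text : String) (out : String) : Prop := out = strip_lean_block_comments_preserve_lines_py_alt text
instance (text : String) (out : String) : Decidable (Spec_strip_lean_block_comments_preserve_lines_py text out) := by unfold Spec_strip_lean_block_comments_preserve_lines_py; infer_instance

-- ===== CLAIM (what is proved, stated in full; the proofs are below) =====
def Claim_equal_strip_lean_block_comments_preserve_lines_py : Prop := ∀ (text : String), Dom_strip_lean_block_comments_preserve_lines_py text → Spec_strip_lean_block_comments_preserve_lines_py text (strip_lean_block_comments_preserve_lines_py text)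

-- ===== LEMMAS AND PROOFS =====

theorem goA_zero (l : List Char) :
    stripGoA l 0 = (match find2 '/' '-' l with
      | none => l
      | some j => l.take j ++ stripGoA (l.drop (j + 2)) 1) := by
  induction l with
  | nil => simp [stripGoA, find2]
  | cons c rest ih =>
    by_cases hm : c = '/' ∧ rest.head? = some '-'
    · rw [stripGoA]
      simp only [hm, find2]
      simp [List.drop_succ_cons, List.drop_one]
    · rw [stripGoA]
      rw [if_neg hm]
      have h0 : ¬ ((0:Nat) > 0 ∧ c = '-' ∧ rest.head? = some '/') := by simp
      rw [if_neg h0, if_neg (by simp : ¬ (0:Nat) > 0)]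
      simp only [find2, if_neg hm]
      cases hf : find2 '/' '-' rest with
      | none => rw [hf] at ih; simpa using congrArg (c :: ·) ih
      | some j =>
        rw [hf] at ih
        simp only [Option.map_some]
        rw [List.take_succ_cons, List.drop_succ_cons]
        simpa using congrArg (c :: ·) ih

theorem goA_pos (l : List Char) (d : Nat) :
    stripGoA l (d + 1) = (match find2 '/' '-' l, find2 '-' '/' l with
      | none, none => blankB l
      | some j, none => blankB (l.take j) ++ stripGoA (l.drop (j + 2)) (d + 2)
      | none, some k => blankB (l.take k) ++ stripGoA (l.drop (k + 2)) d
      | some j, some k =>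
        if j ≤ k then blankB (l.take j) ++ stripGoA (l.drop (j + 2)) (d + 2)
        else blankB (l.take k) ++ stripGoA (l.drop (k + 2)) d) := by
  induction l with
  | nil => simp [stripGoA, find2, blankB]
  | cons c rest ih =>
    by_cases ho : c = '/' ∧ rest.head? = some '-'
    · have hc : ¬ (c = '-' ∧ rest.head? = some '/') := by
        rintro ⟨h1, -⟩; rw [ho.1] at h1; exact absurd h1 (by decide)
      rw [stripGoA, if_pos ho]
      have e1 : find2 '/' '-' (c :: rest) = some 0 := by simp [find2, ho]
      have e2 : find2 '-' '/' (c :: rest) = (find2 '-' '/' rest).map (· + 1) := by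
        simp [find2, hc]
      rw [e1, e2]
      cases hf : find2 '-' '/' rest <;>
        simp [blankB, List.drop_succ_cons, List.drop_one]
    · by_cases hc : c = '-' ∧ rest.head? = some '/'
      · rw [stripGoA, if_neg ho, if_pos ⟨Nat.succ_pos d, hc.1, hc.2⟩]
        have e1 : find2 '/' '-' (c :: rest) = (find2 '/' '-' rest).map (· + 1) := by
          simp [find2, ho]
        have e2 : find2 '-' '/' (c :: rest) = some 0 := by simp [find2, hc]
        rw [e1, e2]
        cases hf : find2 '/' '-' rest <;>
          simp [blankB, List.drop_succ_cons, List.drop_one]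
      · rw [stripGoA, if_neg ho, if_neg (fun h => hc ⟨h.2.1, h.2.2⟩), if_pos (Nat.succ_pos d)]
        have e1 : find2 '/' '-' (c :: rest) = (find2 '/' '-' rest).map (· + 1) := by
          simp [find2, ho]
        have e2 : find2 '-' '/' (c :: rest) = (find2 '-' '/' rest).map (· + 1) := by
          simp [find2, hc]
        rw [e1, e2, ih]
        cases hf1 : find2 '/' '-' rest <;> cases hf2 : find2 '-' '/' rest <;>
          simp only [Option.map_none, Option.map_some]
        · simp [blankB]
        · simp [blankB, List.take_succ_cons, List.drop_succ_cons]
        · simp [blankB, List.take_succ_cons, List.drop_succ_cons]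
        · rename_i j k
          by_cases hjk : j ≤ k
          · rw [if_pos hjk, if_pos (by omega : j + 1 ≤ k + 1)]
            simp [blankB, List.take_succ_cons, List.drop_succ_cons]
          · rw [if_neg hjk, if_neg (by omega : ¬ j + 1 ≤ k + 1)]
            simp [blankB, List.take_succ_cons, List.drop_succ_cons]

theorem goA_eq_goB : ∀ (n : Nat) (l : List Char) (d : Nat), l.length ≤ n → stripGoA l d = stripGoB l d := by
  intro n
  induction n with
  | zero =>
    intro l d hl
    have hnil : l = [] := List.eq_nil_of_length_eq_zero (Nat.le_zero.mp hl)
    subst hnil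
    rw [stripGoB.eq_def]
    cases d <;> simp [stripGoA, find2, blankB]
  | succ n ih =>
    intro l d hl
    cases d with
    | zero =>
      rw [goA_zero, stripGoB.eq_def, if_pos rfl]
      cases hf : find2 '/' '-' l <;> simp only [hf]
      rename_i j
      have hj := find2_le hf
      have : (l.drop (j + 2)).length ≤ n := by simp; omega
      rw [ih _ _ this]
    | succ d =>
      rw [goA_pos, stripGoB.eq_def, if_neg (Nat.succ_ne_zero d)]
      cases hf1 : find2 '/' '-' l <;> cases hf2 : find2 '-' '/' l <;>
        simp only [hf1, hf2, Nat.add_sub_cancel]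
      · rename_i k
        have hk := find2_le hf2
        rw [ih _ _ (by simp; omega : (l.drop (k + 2)).length ≤ n)]
      · rename_i j
        have hj := find2_le hf1
        rw [ih _ _ (by simp; omega : (l.drop (j + 2)).length ≤ n)]
      · rename_i j k
        have hj := find2_le hf1
        have hk := find2_le hf2
        by_cases hjk : j ≤ k
        · rw [if_pos hjk, if_pos hjk, ih _ _ (by simp; omega : (l.drop (j + 2)).length ≤ n)]
        · rw [if_neg hjk, if_neg hjk, ih _ _ (by simp; omega : (l.drop (k + 2)).length ≤ n)]

-- ===== VERDICT (by name: the statement is the Claim_ definition above) =====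
theorem strip_lean_block_comments_preserve_lines_py_spec : Claim_equal_strip_lean_block_comments_preserve_lines_py := by
  intro text _
  unfold Spec_strip_lean_block_comments_preserve_lines_py strip_lean_block_comments_preserve_lines_py strip_lean_block_comments_preserve_lines_py_alt
  rw [goA_eq_goB text.toList.length _ _ le_rfl]
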